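-- pv_equiv track=rewrite | github.com/L0rd-0f-w33bs/TestIS | be/deploy_be.py | newbinary
-- ===== SOURCE A (Python) =====
-- def newbinary(rev):
--     review = list(rev)
--     new_list = []
--     deletelist = []
--     add_again = []
--     temp = []  # for one sentence at a time
--
--     while review:
--         for word in review:
--             deletelist.append(word)
--             if word in ['.', '!', ';']:
--                 new_list.append(word)
--                 break
--             if word not in temp:
--                 new_list.append(word)
--                 temp.append(word)
--             elif word not in add_again:
--                 add_again.append(word)
--             else:
--                 new_list.append(word)
--                 temp.append(word)
--                 add_again.remove(word)
--
--         for word in deletelist: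
--             review.remove(word)
--         deletelist.clear()
--         temp.clear()
--
--     return new_list
-- ===== SOURCE B (Python) =====
-- def newbinary(rev):
--     # One linear pass with O(1) set membership: terminators reset the per-sentence
--     # temp set; add_again persists across sentences, exactly as in the original.
--     # temp/add_again are only membership-tested, never output, so sets are exact.
--     new_list = []
--     temp = set()
--     add_again = set()
--     for word in rev:
--         if word in ('.', '!', ';'):
--             new_list.append(word)
--             temp = set()
--         elif word not in temp:
--             new_list.append(word)
--             temp.add(word)
--         elif word not in add_again:
--             add_again.add(word)
--         else:
--             new_list.append(word)
--             temp.add(word)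
--             add_again.remove(word)
--     return new_list
-- ===== Notes on version B (the rewrite author's own statement) =====
-- stated objective: faster
-- what changed: Replaced the while-loop that repeatedly re-scans and peels each sentence off the list via list.remove, with list-typed temp/add_again scanned linearly per word, by a single left-to-right pass that resets a per-sentence temp set at each terminator and keeps add_again as a set, so all membership tests are O(1).
import Mathlib
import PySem

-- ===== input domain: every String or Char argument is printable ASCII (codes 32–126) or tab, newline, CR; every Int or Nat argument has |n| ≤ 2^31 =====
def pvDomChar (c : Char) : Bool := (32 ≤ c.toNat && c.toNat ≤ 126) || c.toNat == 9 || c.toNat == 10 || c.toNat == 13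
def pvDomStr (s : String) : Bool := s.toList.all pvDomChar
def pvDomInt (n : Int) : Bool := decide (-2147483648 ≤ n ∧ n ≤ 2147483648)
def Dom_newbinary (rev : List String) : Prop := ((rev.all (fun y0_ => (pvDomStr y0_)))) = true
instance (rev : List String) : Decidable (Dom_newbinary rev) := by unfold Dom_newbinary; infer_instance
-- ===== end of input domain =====

-- B replaces A's repeated sentence-peeling (while-loop + list.remove passes, re-scanning list-typed temp/add_again)
-- by one linear pass with set-typed temp/add_again; return values are identical on all inputs.

-- ===== PORT A =====
-- Inner `for word in review` loop of A: accumulates new_list, deletelist, temp, add_again;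
-- stops (break) at '.', '!' or ';'. `add_again.remove(word)` is ported with PySem.List.remove?;
-- in that branch `word ∈ add_again` holds, so the ValueError case (none) is unreachable and getD is exact.
def newbinaryFor (review : List String) (new_list deletelist temp add_again : List String) :
    List String × List String × List String × List String :=
  match review with
  | [] => (new_list, deletelist, temp, add_again)
  | word :: rest =>
    let deletelist := deletelist ++ [word]
    if word ∈ ([".", "!", ";"] : List String) then
      (new_list ++ [word], deletelist, temp, add_again)          -- break
    else if word ∉ temp then
      newbinaryFor rest (new_list ++ [word]) deletelist (temp ++ [word]) add_again
    else if word ∉ add_again then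
      newbinaryFor rest new_list deletelist temp (add_again ++ [word])
    else
      newbinaryFor rest (new_list ++ [word]) deletelist (temp ++ [word])
        ((PySem.List.remove? add_again word).getD add_again)

-- `for word in deletelist: review.remove(word)`; every word of deletelist occurs in review
-- (it is a traversed prefix), so the ValueError case (none) is unreachable and getD is exact.
def newbinaryDel (review deletelist : List String) : List String :=
  deletelist.foldl (fun acc word => (PySem.List.remove? acc word).getD acc) review

-- `while review:` — fuel = |review| suffices since each iteration removes at least one word.
def newbinaryWhile (fuel : Nat) (review new_list temp add_again : List String) : List String :=
  match fuel with
  | 0 => new_list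
  | fuel + 1 =>
    match review with
    | [] => new_list
    | _ :: _ =>
      let r := newbinaryFor review new_list [] temp add_again
      -- r = (new_list, deletelist, temp, add_again); then review.remove each deletelist word,
      -- deletelist.clear(), temp.clear()
      newbinaryWhile fuel (newbinaryDel review r.2.1) r.1 [] r.2.2.2

def newbinary (rev : List String) : List String :=
  newbinaryWhile rev.length rev [] [] []

-- ===== PORT B =====
-- One step of B's single for-loop over the words; state = (new_list, temp, add_again) with temp
-- and add_again Python sets (PySem.Set). `add_again.remove(word)` via PySem.Set.remove?; in that
-- branch `word ∈ add_again` holds, so the KeyError case (none) is unreachable and getD is exact.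
def newbinaryStep (st : List String × PySem.Set String × PySem.Set String) (word : String) :
    List String × PySem.Set String × PySem.Set String :=
  if word ∈ ([".", "!", ";"] : List String) then
    (st.1 ++ [word], PySem.Set.empty, st.2.2)
  else if word ∉ st.2.1 then
    (st.1 ++ [word], PySem.Set.add st.2.1 word, st.2.2)
  else if word ∉ st.2.2 then
    (st.1, st.2.1, PySem.Set.add st.2.2 word)
  else
    (st.1 ++ [word], PySem.Set.add st.2.1 word, (PySem.Set.remove? st.2.2 word).getD st.2.2)

def newbinary_alt (rev : List String) : List String :=
  (rev.foldl newbinaryStep ([], PySem.Set.empty, PySem.Set.empty)).1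

-- ===== PRECONDITION & SPEC =====
def Spec_newbinary (rev : List String) (out : List String) : Prop := out = newbinary_alt rev
instance (rev : List String) (out : List String) : Decidable (Spec_newbinary rev out) := by unfold Spec_newbinary; infer_instance

-- ===== CLAIM (what is proved, stated in full; the proofs are below) =====
def Claim_equal_newbinary : Prop := ∀ (rev : List String), Dom_newbinary rev → Spec_newbinary rev (newbinary rev)

-- ===== LEMMAS AND PROOFS =====

-- list-state counterpart of newbinaryStep, mirroring A's branch bodies (proof device)
def pvStepL (st : List String × List String × List String) (word : String) :
    List String × List String × List String :=
  if word ∈ ([".", "!", ";"] : List String) then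
    (st.1 ++ [word], [], st.2.2)
  else if word ∉ st.2.1 then
    (st.1 ++ [word], st.2.1 ++ [word], st.2.2)
  else if word ∉ st.2.2 then
    (st.1, st.2.1, st.2.2 ++ [word])
  else
    (st.1 ++ [word], st.2.1 ++ [word], (PySem.List.remove? st.2.2 word).getD st.2.2)

-- splits a word list at the first sentence terminator
def pvSplitTerm (ws : List String) : List String × Option (String × List String) :=
  match ws with
  | [] => ([], none)
  | w :: rest =>
    if w ∈ ([".", "!", ";"] : List String) then ([], some (w, rest))
    else
      let r := pvSplitTerm rest
      (w :: r.1, r.2)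

theorem pvSplitTerm_none {ws p : List String} (h : pvSplitTerm ws = (p, none)) : p = ws := by
  induction ws generalizing p with
  | nil => simpa [pvSplitTerm] using congrArg Prod.fst h
  | cons w rest ih =>
    by_cases hw : w ∈ ([".", "!", ";"] : List String)
    · simp [pvSplitTerm, hw] at h
    · simp only [pvSplitTerm, hw] at h
      have h1 : p = w :: (pvSplitTerm rest).1 := (congrArg Prod.fst h).symm
      have h2 : (pvSplitTerm rest).2 = none := congrArg Prod.snd h
      have := ih (p := (pvSplitTerm rest).1) (by rw [← h2])
      simp [h1, this]

set_option maxRecDepth 4000 in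
theorem pvSplitTerm_some {ws p : List String} {t : String} {s : List String}
    (h : pvSplitTerm ws = (p, some (t, s))) :
    ws = p ++ t :: s ∧ t ∈ ([".", "!", ";"] : List String) := by
  induction ws generalizing p with
  | nil => simp [pvSplitTerm] at h
  | cons w rest ih =>
    by_cases hw : w ∈ ([".", "!", ";"] : List String)
    · simp only [pvSplitTerm] at h
      rw [if_pos hw] at h
      injection h with hp h2
      injection h2 with h3
      injection h3 with ht hs
      subst hp; subst ht; subst hs
      exact ⟨rfl, hw⟩
    · simp only [pvSplitTerm, hw] at h
      have h1 : p = w :: (pvSplitTerm rest).1 := (congrArg Prod.fst h).symm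
      have h2' : (pvSplitTerm rest).2 = some (t, s) := congrArg Prod.snd h
      have h2 : pvSplitTerm rest = ((pvSplitTerm rest).1, some (t, s)) := by
        rw [← h2']
      obtain ⟨hr, hti⟩ := ih h2
      subst h1
      exact ⟨by rw [List.cons_append, ← hr], hti⟩

-- A's inner for-loop, characterised through pvStepL and the terminator split.
theorem newbinaryFor_eq (ws : List String) (nl dl tp aa : List String) :
    newbinaryFor ws nl dl tp aa =
      match pvSplitTerm ws with
      | (p, none) =>
          let r := p.foldl pvStepL (nl, tp, aa)
          (r.1, dl ++ p, r.2.1, r.2.2)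
      | (p, some (t, _)) =>
          let r := p.foldl pvStepL (nl, tp, aa)
          (r.1 ++ [t], dl ++ p ++ [t], r.2.1, r.2.2) := by
  induction ws generalizing nl dl tp aa with
  | nil => simp [newbinaryFor, pvSplitTerm]
  | cons w rest ih =>
    by_cases hw : w ∈ ([".", "!", ";"] : List String)
    · simp [newbinaryFor, pvSplitTerm, hw]
    · by_cases ht : w ∈ tp
      · by_cases ha : w ∈ aa
        · simp only [newbinaryFor, pvSplitTerm, hw, ht, ha, if_neg, not_true,
            not_false_iff]
          rw [ih]
          cases hsp : pvSplitTerm rest with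
          | mk p r2 =>
            cases r2 with
            | none => simp [pvStepL, hw, ht, ha, List.append_assoc]
            | some ts => cases ts with
              | mk t s => simp [pvStepL, hw, ht, ha, List.append_assoc]
        · simp only [newbinaryFor, pvSplitTerm, hw, ht, ha, if_neg, not_true,
            not_false_iff]
          rw [ih]
          cases hsp : pvSplitTerm rest with
          | mk p r2 =>
            cases r2 with
            | none => simp [pvStepL, hw, ht, ha, List.append_assoc]
            | some ts => cases ts with
              | mk t s => simp [pvStepL, hw, ht, ha, List.append_assoc]
      · simp only [newbinaryFor, pvSplitTerm, hw, ht, if_neg, not_false_iff, ite_true]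
        rw [ih]
        cases hsp : pvSplitTerm rest with
        | mk p r2 =>
          cases r2 with
          | none => simp [pvStepL, hw, ht, List.append_assoc]
          | some ts => cases ts with
            | mk t s => simp [pvStepL, hw, ht, List.append_assoc]

-- removing a traversed prefix element-by-element leaves exactly the suffix
theorem newbinaryDel_cancel (p s : List String) : newbinaryDel (p ++ s) p = s := by
  induction p with
  | nil => simp [newbinaryDel]
  | cons w p ih =>
    have : newbinaryDel (w :: (p ++ s)) (w :: p) = newbinaryDel (p ++ s) p := by
      simp [newbinaryDel, PySem.List.remove?_cons_self]
    simpa [this] using ih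

-- A's while-loop equals the single list-state fold
theorem newbinaryWhile_eq (fuel : Nat) : ∀ (ws nl tp aa : List String), ws.length ≤ fuel →
    newbinaryWhile fuel ws nl tp aa = (ws.foldl pvStepL (nl, tp, aa)).1 := by
  induction fuel with
  | zero =>
    intro ws nl tp aa h
    have : ws = [] := List.eq_nil_of_length_eq_zero (Nat.le_zero.mp h)
    subst this; simp [newbinaryWhile]
  | succ fuel ih =>
    intro ws nl tp aa h
    cases ws with
    | nil => simp [newbinaryWhile]
    | cons w rest =>
      rw [newbinaryWhile]
      simp only [newbinaryFor_eq]
      cases hsp : pvSplitTerm (w :: rest) with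
      | mk p r2 =>
        cases r2 with
        | none =>
          have hp : p = w :: rest := pvSplitTerm_none hsp
          subst hp
          have hdel : newbinaryDel (w :: rest) (w :: rest) = [] := by
            have := newbinaryDel_cancel (w :: rest) []
            simpa using this
          simp only [hdel, List.nil_append]
          rw [ih [] _ [] _ (by simp)]
          simp
        | some ts =>
          cases ts with
          | mk t s =>
            obtain ⟨hws, hterm⟩ := pvSplitTerm_some hsp
            have hdel : newbinaryDel (w :: rest) (p ++ [t]) = s := by
              have h1 : w :: rest = (p ++ [t]) ++ s := by simp [hws]
              rw [h1]; exact newbinaryDel_cancel (p ++ [t]) s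
            have hlen : s.length ≤ fuel := by
              have hl := congrArg List.length hws
              simp at hl h
              omega
            simp only [List.nil_append, hdel]
            rw [ih s _ [] _ hlen]
            have hfold : (w :: rest).foldl pvStepL (nl, tp, aa) =
                s.foldl pvStepL (pvStepL (p.foldl pvStepL (nl, tp, aa)) t) := by
              rw [hws]
              rw [List.foldl_append]
              simp [List.foldl_cons]
            rw [hfold]
            have hstep : pvStepL (p.foldl pvStepL (nl, tp, aa)) t =
                ((p.foldl pvStepL (nl, tp, aa)).1 ++ [t], [],
                 (p.foldl pvStepL (nl, tp, aa)).2.2) := by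
              simp [pvStepL, hterm]
            rw [hstep]

-- on a duplicate-free list, Python's set.remove(x) and list.remove(x) leave the same list
theorem pvErase_eq_discard (s : List String) (x : String) (h : s.Nodup) :
    s.erase x = PySem.Set.discard s x := by
  rw [h.erase_eq_filter x]; rfl

-- the list-state fold and B's set-state fold produce the same new_list (temp lists are
-- membership-equal, add_again lists are equal and duplicate-free throughout)
theorem pvFold_congr (ws : List String) :
    ∀ (nl t₁ : List String) (t₂ : PySem.Set String) (aa : List String),
    (∀ x, x ∈ t₁ ↔ x ∈ t₂) → aa.Nodup →
    (ws.foldl pvStepL (nl, t₁, aa)).1 = (ws.foldl newbinaryStep (nl, t₂, aa)).1 := by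
  induction ws with
  | nil => intro nl t₁ t₂ aa hmem hnd; rfl
  | cons w rest ih =>
    intro nl t₁ t₂ aa hmem hnd
    simp only [List.foldl_cons]
    by_cases hw : w ∈ ([".", "!", ";"] : List String)
    · have e1 : pvStepL (nl, t₁, aa) w = (nl ++ [w], [], aa) := by simp [pvStepL, hw]
      have e2 : newbinaryStep (nl, t₂, aa) w = (nl ++ [w], PySem.Set.empty, aa) := by
        simp [newbinaryStep, hw]
      rw [e1, e2]
      exact ih _ _ _ _ (by simp [PySem.Set.empty]) hnd
    · by_cases h1 : w ∈ t₁
      · have h2 : w ∈ t₂ := (hmem w).mp h1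
        by_cases ha : w ∈ aa
        · have e1 : pvStepL (nl, t₁, aa) w =
              (nl ++ [w], t₁ ++ [w], (PySem.List.remove? aa w).getD aa) := by
            simp [pvStepL, hw, h1, ha]
          have e2 : newbinaryStep (nl, t₂, aa) w =
              (nl ++ [w], PySem.Set.add t₂ w, (PySem.Set.remove? aa w).getD aa) := by
            simp [newbinaryStep, hw, h2, ha]
          have hr1 : (PySem.List.remove? aa w).getD aa = aa.erase w := by
            rw [PySem.List.remove?_eq_some_erase aa w ha]; rfl
          have hr2 : (PySem.Set.remove? aa w).getD aa = PySem.Set.discard aa w := by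
            rw [PySem.Set.remove?_of_mem ha]; rfl
          rw [e1, e2, hr1, hr2, pvErase_eq_discard aa w hnd,
              PySem.Set.add_of_mem h2]
          exact ih _ _ _ _
            (by intro x; simp only [List.mem_append, List.mem_singleton]
                constructor
                · rintro (hx | rfl)
                  · exact (hmem x).mp hx
                  · exact h2
                · intro hx; exact Or.inl ((hmem x).mpr hx))
            (by
              have : (PySem.Set.discard aa w).Nodup := PySem.Set.nodup_discard aa w hnd
              exact this)
        · have e1 : pvStepL (nl, t₁, aa) w = (nl, t₁, aa ++ [w]) := by
            simp [pvStepL, hw, h1, ha]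
          have e2 : newbinaryStep (nl, t₂, aa) w = (nl, t₂, PySem.Set.add aa w) := by
            simp [newbinaryStep, hw, h2, ha]
          rw [e1, e2, PySem.Set.add_of_not_mem ha]
          exact ih _ _ _ _ hmem
            (hnd.append (List.nodup_singleton w) (by simpa using ha))
      · have h2 : w ∉ t₂ := fun hx => h1 ((hmem w).mpr hx)
        have e1 : pvStepL (nl, t₁, aa) w = (nl ++ [w], t₁ ++ [w], aa) := by
          simp [pvStepL, hw, h1]
        have e2 : newbinaryStep (nl, t₂, aa) w = (nl ++ [w], PySem.Set.add t₂ w, aa) := by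
          simp [newbinaryStep, hw, h2]
        rw [e1, e2, PySem.Set.add_of_not_mem h2]
        exact ih _ _ _ _
          (by intro x; simp only [List.mem_append, List.mem_singleton]
              exact or_congr (hmem x) Iff.rfl) hnd

-- ===== VERDICT (by name: the statement is the Claim_ definition above) =====
theorem newbinary_spec : Claim_equal_newbinary := by
  intro rev _
  unfold Spec_newbinary newbinary newbinary_alt
  rw [newbinaryWhile_eq rev.length rev [] [] [] (le_refl _)]
  exact pvFold_congr rev [] [] PySem.Set.empty [] (by simp [PySem.Set.empty]) List.nodup_nil
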